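-- pv_equiv track=rewrite | github.com/SnoopLawg/FBMarketCarScraper | valuations.py | _pick_edmunds_style
-- ===== SOURCE A (Python) =====
-- def _pick_edmunds_style(all_tmvs, user_trim, user_drivetrain):
--     """Pick the Edmunds style that best matches user's trim and drivetrain."""
--     if not all_tmvs:
--         return None
--
--     scored = []
--     for style in all_tmvs:
--         sname = (style.get("styleName") or "").lower()
--         score = 0
--
--         # Trim match
--         if user_trim:
--             trim_words = user_trim.lower().split()
--             for word in trim_words:
--                 if word in sname:
--                     score += 10
--
--         # Drivetrain match
--         if user_drivetrain:
--             if user_drivetrain in sname: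
--                 score += 5
--             elif user_drivetrain in ("awd", "4wd") and "awd" in sname:
--                 score += 5
--
--         scored.append((score, style))
--
--     scored.sort(key=lambda x: -x[0])
--     return scored[0][1]
-- ===== SOURCE B (Python) =====
-- def _pick_edmunds_style(all_tmvs, user_trim, user_drivetrain):
--     """Pick the Edmunds style that best matches user's trim and drivetrain."""
--     if not all_tmvs:
--         return None
--
--     def score(style):
--         sname = (style.get("styleName") or "").lower()
--         s = 0
--         if user_trim:
--             for word in user_trim.lower().split():
--                 if word in sname:
--                     s += 10
--         if user_drivetrain:
--             if user_drivetrain in sname: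
--                 s += 5
--             elif user_drivetrain in ("awd", "4wd") and "awd" in sname:
--                 s += 5
--         return s
--
--     best = all_tmvs[0]
--     best_score = score(best)
--     for style in all_tmvs[1:]:
--         sc = score(style)
--         if sc > best_score:
--             best, best_score = style, sc
--     return best
-- ===== Notes on version B (the rewrite author's own statement) =====
-- stated objective: simpler
-- what changed: Replaces the build-a-scored-list-then-sort-and-take-head selection with a single max-tracking scan (strict > keeps the first of tied maxima, matching the stable sort).
import Mathlib
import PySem

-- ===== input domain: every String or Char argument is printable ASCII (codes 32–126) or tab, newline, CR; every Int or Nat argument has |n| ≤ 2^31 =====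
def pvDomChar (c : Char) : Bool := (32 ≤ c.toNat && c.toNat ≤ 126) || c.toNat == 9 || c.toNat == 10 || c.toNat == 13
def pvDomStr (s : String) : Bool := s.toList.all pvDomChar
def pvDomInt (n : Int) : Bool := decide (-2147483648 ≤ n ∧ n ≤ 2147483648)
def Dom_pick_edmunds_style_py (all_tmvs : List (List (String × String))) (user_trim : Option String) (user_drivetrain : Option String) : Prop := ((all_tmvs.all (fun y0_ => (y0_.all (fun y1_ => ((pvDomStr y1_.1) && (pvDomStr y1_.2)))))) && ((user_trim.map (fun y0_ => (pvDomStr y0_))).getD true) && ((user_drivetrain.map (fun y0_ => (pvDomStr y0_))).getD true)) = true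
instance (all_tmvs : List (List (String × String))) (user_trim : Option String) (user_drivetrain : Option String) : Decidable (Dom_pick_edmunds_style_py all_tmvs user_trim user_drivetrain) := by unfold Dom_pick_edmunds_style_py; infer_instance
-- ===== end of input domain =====

-- B replaces A's score-list-then-stable-sort selection by a single max-tracking scan
-- (strict '>' keeps the first of tied maxima, matching the stable sort); same return value, simpler.

-- ===== PORT A =====
-- Literal transliteration of _pick_edmunds_style: build a scored list, stable-sort it by
-- key = -score, return the first element's style. 'style.get("styleName") or ""' is ported
-- as (lookup).getD "" (exact: a present-but-empty value and a missing key both yield "").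
-- 'scored[0]' cannot raise here (scored is nonempty), ported as pyGet? … 0.
def pick_edmunds_style_py (all_tmvs : List (List (String × String))) (user_trim : Option String) (user_drivetrain : Option String) : Option (List (String × String)) :=
  if all_tmvs = [] then none
  else
    let scored : List (Int × List (String × String)) := all_tmvs.foldl (fun acc style =>
      let sname := PySem.Str.lower ((style.lookup "styleName").getD "")
      let score : Int := 0
      let score :=
        match user_trim with
        | none => score
        | some t =>
          if t = "" then score
          else (PySem.Str.split₀ (PySem.Str.lower t)).foldl
                 (fun s word => if PySem.Str.isIn word sname then s + 10 else s) score
      let score :=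
        match user_drivetrain with
        | none => score
        | some d =>
          if d = "" then score
          else if PySem.Str.isIn d sname then score + 5
          else if (d == "awd" || d == "4wd") && PySem.Str.isIn "awd" sname then score + 5
          else score
      acc ++ [(score, style)]) []
    (PySem.List.pyGet? (PySem.List.sorted scored (fun x => -x.1)) 0).map (fun x => x.2)

-- ===== PORT B =====
-- Source B's local helper score(style)
def pvScore (user_trim : Option String) (user_drivetrain : Option String) (style : List (String × String)) : Int :=
  let sname := PySem.Str.lower ((style.lookup "styleName").getD "")
  let score : Int := 0
  let score :=
    match user_trim with
    | none => score
    | some t =>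
      if t = "" then score
      else (PySem.Str.split₀ (PySem.Str.lower t)).foldl
             (fun s word => if PySem.Str.isIn word sname then s + 10 else s) score
  let score :=
    match user_drivetrain with
    | none => score
    | some d =>
      if d = "" then score
      else if PySem.Str.isIn d sname then score + 5
      else if (d == "awd" || d == "4wd") && PySem.Str.isIn "awd" sname then score + 5
      else score
  score

-- single pass: track (best, best_score), replace only on strictly greater score
def pick_edmunds_style_py_alt (all_tmvs : List (List (String × String))) (user_trim : Option String) (user_drivetrain : Option String) : Option (List (String × String)) :=
  match all_tmvs with
  | [] => none
  | x :: rest =>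
    some ((rest.foldl (fun best style =>
      let sc := pvScore user_trim user_drivetrain style
      if sc > best.2 then (style, sc) else best) (x, pvScore user_trim user_drivetrain x)).1)

-- ===== PRECONDITION & SPEC =====
def Spec_pick_edmunds_style_py (all_tmvs : List (List (String × String))) (user_trim : Option String) (user_drivetrain : Option String) (out : Option (List (String × String))) : Prop := out = pick_edmunds_style_py_alt all_tmvs user_trim user_drivetrain
instance (all_tmvs : List (List (String × String))) (user_trim : Option String) (user_drivetrain : Option String) (out : Option (List (String × String))) : Decidable (Spec_pick_edmunds_style_py all_tmvs user_trim user_drivetrain out) := by unfold Spec_pick_edmunds_style_py; infer_instance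

-- ===== CLAIM (what is proved, stated in full; the proofs are below) =====
def Claim_equal_pick_edmunds_style_py : Prop := ∀ (all_tmvs : List (List (String × String))) (user_trim : Option String) (user_drivetrain : Option String), Dom_pick_edmunds_style_py all_tmvs user_trim user_drivetrain → Spec_pick_edmunds_style_py all_tmvs user_trim user_drivetrain (pick_edmunds_style_py all_tmvs user_trim user_drivetrain)

-- ===== LEMMAS AND PROOFS =====

-- Head of the stable insertion-sort fold: folding insertBy over t starting from a
-- nonempty accumulator produces a list whose head is the running "if before then replace"
-- fold of the old head.
lemma pv_foldl_insertBy_cons {α : Type} (bf : α → α → Bool) :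
    ∀ (t : List α) (h : α) (rest : List α), ∃ r',
      t.foldl (fun acc y => PySem.List.insertBy bf y acc) (h :: rest)
        = (t.foldl (fun b y => if bf y b then y else b) h) :: r' := by
  intro t
  induction t with
  | nil => exact fun h rest => ⟨rest, rfl⟩
  | cons y t ih =>
    intro h rest
    simp only [List.foldl_cons, PySem.List.insertBy]
    by_cases hb : bf y h
    · simp only [hb, if_true]
      exact ih y (h :: rest)
    · simp only [hb, if_false, Bool.false_eq_true]
      exact ih h (PySem.List.insertBy bf y rest)

-- The replace-head fold over the scored pairs is the swap of B's best-tracking fold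
-- (both replace exactly when the new score is strictly greater).
lemma pv_fold_swap (ut ud : Option String) :
    ∀ (t : List (List (String × String))) (b : List (String × String)) (sc : Int),
      List.foldl (fun (x : Int × List (String × String)) y =>
          if decide (-pvScore ut ud y < -x.1) = true then (pvScore ut ud y, y) else x) (sc, b) t
        = Prod.swap (List.foldl (fun best style =>
            if pvScore ut ud style > best.2 then (style, pvScore ut ud style) else best) (b, sc) t) := by
  intro t
  induction t with
  | nil => intro b sc; rfl
  | cons s t ih =>
    intro b sc
    simp only [List.foldl_cons]
    by_cases h : sc < pvScore ut ud s
    · have h1 : (decide (-(pvScore ut ud s) < -sc)) = true := by simp; omega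
      have h2 : (pvScore ut ud s > sc) = True := by simp [h]
      simp only [h1, h2, if_true]
      exact ih s (pvScore ut ud s)
    · have h1 : (decide (-(pvScore ut ud s) < -sc)) = false := by simp; omega
      simp only [h1, gt_iff_lt, h, if_false, Bool.false_eq_true]
      exact ih b sc

-- ===== VERDICT (by name: the statement is the Claim_ definition above) =====
theorem pick_edmunds_style_py_spec : Claim_equal_pick_edmunds_style_py := by
  intro all_tmvs ut ud _
  unfold Spec_pick_edmunds_style_py
  cases all_tmvs with
  | nil => rfl
  | cons x t =>
    unfold pick_edmunds_style_py pick_edmunds_style_py_alt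
    simp only [reduceCtorEq, if_false]
    -- the inline scoring lambda is definitionally pvScore
    have hfun : (fun (acc : List (Int × List (String × String))) style =>
      let sname := PySem.Str.lower ((style.lookup "styleName").getD "")
      let score : Int := 0
      let score :=
        match ut with
        | none => score
        | some tr =>
          if tr = "" then score
          else (PySem.Str.split₀ (PySem.Str.lower tr)).foldl
                 (fun s word => if PySem.Str.isIn word sname then s + 10 else s) score
      let score :=
        match ud with
        | none => score
        | some d =>
          if d = "" then score
          else if PySem.Str.isIn d sname then score + 5
          else if (d == "awd" || d == "4wd") && PySem.Str.isIn "awd" sname then score + 5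
          else score
      acc ++ [(score, style)])
      = (fun acc style => acc ++ [(pvScore ut ud style, style)]) := rfl
    rw [hfun, PySem.List.foldl_append_singleton_eq_map,
        PySem.List.sorted_eq_foldl_insertBy]
    simp only [List.map_cons, List.nil_append, List.foldl_cons]
    have hnil : PySem.List.insertBy
        (fun (a b : Int × List (String × String)) => decide (-a.1 < -b.1))
        (pvScore ut ud x, x) [] = [(pvScore ut ud x, x)] := rfl
    rw [hnil]
    obtain ⟨r', hr⟩ := pv_foldl_insertBy_cons
      (fun (a b : Int × List (String × String)) => decide (-a.1 < -b.1))
      (t.map (fun style => (pvScore ut ud style, style))) (pvScore ut ud x, x) []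
    rw [hr]
    simp only [List.foldl_map]
    rw [pv_fold_swap ut ud t x (pvScore ut ud x)]
    simp [PySem.List.pyGet?, PySem.List.pyIdx?]
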